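-- pv_equiv track=rewrite | github.com/AmineBarrak/Serverless-aggregation-grads-sharding | systems/grads-sharding/shard_manager.py | get_shard_assignments
-- ===== SOURCE A (Python) =====
-- from typing import List, Tuple, Dict, Any
--
-- def get_shard_assignments(
--     model_size: int, num_shards: int
-- ) -> List[Tuple[int, int]]:
--     """
--     Get shard assignments as (start, end) index pairs.
--
--     Args:
--         model_size: Total number of parameters in the model
--         num_shards: Number of shards to split into
--
--     Returns:
--         List of (start, end) tuples for each shard
--     """
--     shard_size = model_size // num_shards
--     remainder = model_size % num_shards
--
--     assignments = []
--     current_idx = 0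
--
--     for shard_id in range(num_shards):
--         # Distribute remainder across first shards
--         size = shard_size + (1 if shard_id < remainder else 0)
--         end_idx = current_idx + size
--         assignments.append((current_idx, end_idx))
--         current_idx = end_idx
--
--     return assignments
-- ===== SOURCE B (Python) =====
-- def get_shard_assignments(model_size, num_shards):
--     shard_size = model_size // num_shards
--     remainder = model_size % num_shards
--     return [
--         (i * shard_size + min(i, remainder),
--          (i + 1) * shard_size + min(i + 1, remainder))
--         for i in range(num_shards)
--     ]
-- ===== Notes on version B (the rewrite author's own statement) =====
-- stated objective: simpler
-- what changed: Replaced the running-accumulator loop (current_idx carried shard to shard) with a stateless closed form: each shard's bounds are computed independently as i*shard_size + min(i, remainder).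
import Mathlib
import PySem

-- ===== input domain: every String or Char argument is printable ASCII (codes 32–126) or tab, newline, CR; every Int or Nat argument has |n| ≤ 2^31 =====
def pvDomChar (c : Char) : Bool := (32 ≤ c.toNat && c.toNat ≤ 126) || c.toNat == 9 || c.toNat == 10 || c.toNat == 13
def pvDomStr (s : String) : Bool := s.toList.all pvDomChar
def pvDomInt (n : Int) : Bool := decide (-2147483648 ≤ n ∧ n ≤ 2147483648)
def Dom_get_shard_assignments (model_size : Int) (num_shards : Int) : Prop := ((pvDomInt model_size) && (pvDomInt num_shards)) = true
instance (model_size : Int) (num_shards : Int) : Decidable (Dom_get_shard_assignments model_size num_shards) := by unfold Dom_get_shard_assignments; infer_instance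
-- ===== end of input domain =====

-- B replaces A's running-accumulator loop by a stateless closed form per shard (simpler decomposition; same cost).

-- ===== PORT A =====
def get_shard_assignments (model_size : Int) (num_shards : Int) : List (Int × Int) :=
  let shard_size := PySem.Int.floordiv model_size num_shards
  let remainder := PySem.Int.mod model_size num_shards
  let st := (PySem.List.pyRange 0 num_shards 1).foldl
    (fun (s : List (Int × Int) × Int) shard_id =>
      let size := shard_size + (if shard_id < remainder then 1 else 0)
      let end_idx := s.2 + size
      (s.1 ++ [(s.2, end_idx)], end_idx))
    ([], 0)
  st.1

-- ===== PORT B =====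
def get_shard_assignments_alt (model_size : Int) (num_shards : Int) : List (Int × Int) :=
  let shard_size := PySem.Int.floordiv model_size num_shards
  let remainder := PySem.Int.mod model_size num_shards
  (PySem.List.pyRange 0 num_shards 1).map
    (fun i => (i * shard_size + min i remainder,
               (i + 1) * shard_size + min (i + 1) remainder))

-- ===== PRECONDITION & SPEC =====
-- Pre_ excludes num_shards = 0, where the Python A raises ZeroDivisionError.
def Pre_get_shard_assignments (model_size : Int) (num_shards : Int) : Prop := num_shards ≠ 0
instance (model_size : Int) (num_shards : Int) : Decidable (Pre_get_shard_assignments model_size num_shards) := by unfold Pre_get_shard_assignments; infer_instance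
def pvWitness_get_shard_assignments : Int × Int := (10, 3)

def Spec_get_shard_assignments (model_size : Int) (num_shards : Int) (out : List (Int × Int)) : Prop := out = get_shard_assignments_alt model_size num_shards
instance (model_size : Int) (num_shards : Int) (out : List (Int × Int)) : Decidable (Spec_get_shard_assignments model_size num_shards out) := by unfold Spec_get_shard_assignments; infer_instance

-- ===== CLAIM (what is proved, stated in full; the proofs are below) =====
def Claim_equal_get_shard_assignments : Prop := ∀ (model_size : Int) (num_shards : Int), Dom_get_shard_assignments model_size num_shards → Pre_get_shard_assignments model_size num_shards → Spec_get_shard_assignments model_size num_shards (get_shard_assignments model_size num_shards)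

-- ===== LEMMAS AND PROOFS =====

-- running min step: min i r + (1 if i < r else 0) = min (i+1) r
lemma pv_min_step (i r : Int) :
    min i r + (if i < r then (1 : Int) else 0) = min (i + 1) r := by
  by_cases h : i < r <;> simp [h] <;> omega

-- loop invariant: A's fold over range(0, n) equals B's map, with current_idx = n*q + min n r
lemma pv_fold_eq (q r : Int) (hr : 0 ≤ r) (n : Nat) :
    ((PySem.List.pyRange 0 (n : Int) 1).foldl
      (fun (s : List (Int × Int) × Int) i =>
        let size := q + (if i < r then 1 else 0)
        let e := s.2 + size
        (s.1 ++ [(s.2, e)], e)) ([], 0))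
    = ((PySem.List.pyRange 0 (n : Int) 1).map
        (fun i => (i * q + min i r, (i + 1) * q + min (i + 1) r)),
       (n : Int) * q + min (n : Int) r) := by
  induction n with
  | zero =>
    simp
    omega
  | succ k ih =>
    have hsplit : PySem.List.pyRange 0 ((k + 1 : Nat) : Int) 1
        = PySem.List.pyRange 0 (k : Int) 1 ++ [(k : Int)] := by
      have := PySem.List.pyRange_one_succ_right (a := 0) (b := (k : Int)) (by positivity)
      push_cast
      push_cast at this
      exact this
    rw [hsplit, List.foldl_append, List.map_append, ih]
    simp only [List.foldl_cons, List.foldl_nil, List.map_cons, List.map_nil]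
    refine Prod.ext ?_ ?_
    · simp only []
      congr 1
      simp only [List.cons.injEq, and_true, Prod.mk.injEq, true_and]
      rw [← pv_min_step (k : Int) r]
      ring
    · simp only []
      push_cast
      rw [← pv_min_step (k : Int) r]
      ring

-- ===== VERDICT (by name: the statement is the Claim_ definition above) =====
theorem get_shard_assignments_spec : Claim_equal_get_shard_assignments := by
  intro m n _ hn
  have hn' : n ≠ 0 := hn
  unfold Spec_get_shard_assignments get_shard_assignments get_shard_assignments_alt
  by_cases hpos : 0 < n
  · have hr : 0 ≤ PySem.Int.mod m n := by
      rw [PySem.Int.mod_eq_emod_of_pos hpos]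
      exact Int.emod_nonneg m (by omega)
    obtain ⟨k, hk⟩ : ∃ k : Nat, n = (k : Int) := ⟨n.toNat, by omega⟩
    subst hk
    simp only []
    rw [pv_fold_eq (PySem.Int.floordiv m (k : Int)) (PySem.Int.mod m (k : Int)) hr k]
  · have : n < 0 := by omega
    rw [PySem.List.pyRange_one_eq_nil (by omega)]
    simp
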